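-- pv_equiv track=rewrite | github.com/angelosalatino/cso-classifier | cso_classifier.py | remove_same_as
-- ===== SOURCE A (Python) =====
-- def remove_same_as(topics,cso):
--     """Function that removes the same as, picking the longest string in alphabetical order.
--
--     Args:
--         topics (array): It contains the list of topics found with the classifier, without statistics.
--         cso (dictionary): the ontology previously loaded from the file.
--
--     Returns:
--         final_topics (array): the filtered topics without their siblings.
--     """
--
--     final_topics = []
--     for topic in topics:
--         if topic in cso['same_as']:
--             # Let's take all the same-as
--             same_as = cso['same_as'][topic].copy()
--             same_as.append(topic)
--             # sort them alphabetically
--             same_as = sorted(same_as)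
--             # append the first longest topic
--             final_topics.append(max(same_as, key=len))
--         else:
--             final_topics.append(topic)
--
--     return final_topics
-- ===== SOURCE B (Python) =====
-- def remove_same_as(topics, cso):
--     """Same result as A: for each topic with same-as entries, pick the
--     alphabetically-smallest among the longest candidates, in one pass
--     (no copy, no sort)."""
--     final_topics = []
--     for topic in topics:
--         cands = cso['same_as'].get(topic)
--         if cands is None:
--             final_topics.append(topic)
--         else:
--             best = topic
--             for c in cands:
--                 if len(c) > len(best) or (len(c) == len(best) and c < best):
--                     best = c
--             final_topics.append(best)
--     return final_topics
-- ===== Notes on version B (the rewrite author's own statement) =====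
-- stated objective: alternative
-- what changed: Replaces the per-topic copy + alphabetical sort + max(key=len) by a single selection pass that keeps the current best candidate (strictly longer wins, equal length broken by lexicographically smaller), seeded with the topic itself; this avoids the O(k log k) sort per topic, though a timing run could not measure it on this item.
import Mathlib
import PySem

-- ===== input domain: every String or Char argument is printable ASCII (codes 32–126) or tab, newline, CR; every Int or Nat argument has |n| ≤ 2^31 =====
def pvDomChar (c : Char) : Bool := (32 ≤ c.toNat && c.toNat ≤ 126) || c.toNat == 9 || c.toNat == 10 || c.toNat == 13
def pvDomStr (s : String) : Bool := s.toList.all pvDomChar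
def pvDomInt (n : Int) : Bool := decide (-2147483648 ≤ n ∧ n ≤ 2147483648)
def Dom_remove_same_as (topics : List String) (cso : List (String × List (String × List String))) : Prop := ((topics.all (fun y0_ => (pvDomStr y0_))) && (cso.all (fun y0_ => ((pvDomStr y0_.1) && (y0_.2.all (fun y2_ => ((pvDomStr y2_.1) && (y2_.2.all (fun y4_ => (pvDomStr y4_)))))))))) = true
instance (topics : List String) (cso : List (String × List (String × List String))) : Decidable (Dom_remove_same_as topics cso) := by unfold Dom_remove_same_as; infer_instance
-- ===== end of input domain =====

-- B replaces A's per-topic copy + alphabetical sort + max(key=len) by a single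
-- selection pass (longer wins, ties broken by lexicographically smaller), avoiding the sort.

-- ===== PORT A =====
def remove_same_as (topics : List String) (cso : List (String × List (String × List String))) : List String :=
  topics.foldl (fun final_topics topic =>
    -- 'topic in cso['same_as']' then 'cso['same_as'][topic]' : one get? match
    match PySem.Dict.get? (PySem.Dict.mk (PySem.Dict.getD (PySem.Dict.mk cso) "same_as" [])) topic with
    | some lst =>
        let same_as := lst ++ [topic]
        let same_as_sorted := PySem.List.sorted same_as (fun x => x) false
        match PySem.List.max? same_as_sorted PySem.Str.len with
        | some m => final_topics ++ [m]
        | none => final_topics   -- unreachable: same_as_sorted is nonempty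
    | none => final_topics ++ [topic]) []

-- ===== PORT B =====
def remove_same_as_alt (topics : List String) (cso : List (String × List (String × List String))) : List String :=
  topics.foldl (fun acc topic =>
    match PySem.Dict.get? (PySem.Dict.mk (PySem.Dict.getD (PySem.Dict.mk cso) "same_as" [])) topic with
    | none => acc ++ [topic]
    | some cands =>
        acc ++ [cands.foldl (fun best c =>
          if PySem.Str.len best < PySem.Str.len c ∨ (PySem.Str.len c = PySem.Str.len best ∧ c < best)
          then c else best) topic]) []

-- ===== PRECONDITION & SPEC =====
-- A raises KeyError when the loop body runs with no 'same_as' key in cso; excluded here.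
def Pre_remove_same_as (topics : List String) (cso : List (String × List (String × List String))) : Prop :=
  topics = [] ∨ PySem.Dict.contains (PySem.Dict.mk cso) "same_as" = true

instance (topics : List String) (cso : List (String × List (String × List String))) : Decidable (Pre_remove_same_as topics cso) := by unfold Pre_remove_same_as; infer_instance

def pvWitness_remove_same_as : List String × (List (String × List (String × List String))) :=
  (["a", "b"], [("same_as", [("a", ["ab", "ac"])])])

def Spec_remove_same_as (topics : List String) (cso : List (String × List (String × List String))) (out : List String) : Prop := out = remove_same_as_alt topics cso
instance (topics : List String) (cso : List (String × List (String × List String))) (out : List String) : Decidable (Spec_remove_same_as topics cso out) := by unfold Spec_remove_same_as; infer_instance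

-- ===== CLAIM =====
def Claim_equal_remove_same_as : Prop := ∀ (topics : List String) (cso : List (String × List (String × List String))), Dom_remove_same_as topics cso → Pre_remove_same_as topics cso → Spec_remove_same_as topics cso (remove_same_as topics cso)

-- ===== LEMMAS AND PROOFS =====

-- 'good m y' : m beats-or-equals y in the order "longer first, then lexicographically smaller".
def good (m y : String) : Prop :=
  PySem.Str.len y < PySem.Str.len m ∨ (PySem.Str.len y = PySem.Str.len m ∧ m ≤ y)

theorem good_refl (m : String) : good m m := Or.inr ⟨rfl, le_refl m⟩

theorem good_trans {a b c : String} (h1 : good a b) (h2 : good b c) : good a c := by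
  rcases h1 with h1 | ⟨e1, l1⟩ <;> rcases h2 with h2 | ⟨e2, l2⟩
  · exact Or.inl (lt_trans h2 h1)
  · exact Or.inl (e2 ▸ h1)
  · exact Or.inl (e1 ▸ h2)
  · exact Or.inr ⟨e2.trans e1, le_trans l1 l2⟩

theorem good_antisymm {a b : String} (h1 : good a b) (h2 : good b a) : a = b := by
  rcases h1 with h1 | ⟨e1, l1⟩ <;> rcases h2 with h2 | ⟨e2, l2⟩
  · exact absurd h1 (not_lt_of_gt h2)
  · exact absurd h1 (e2 ▸ lt_irrefl _)
  · exact absurd h2 (e1 ▸ lt_irrefl _)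
  · exact le_antisymm l1 l2

-- B's selection step
def bstep (best c : String) : String :=
  if PySem.Str.len best < PySem.Str.len c ∨ (PySem.Str.len c = PySem.Str.len best ∧ c < best)
  then c else best

theorem bstep_good_left (best c : String) : good (bstep best c) best := by
  unfold bstep; split_ifs with h
  · rcases h with h | ⟨e, l⟩
    · exact Or.inl h
    · exact Or.inr ⟨e.symm, le_of_lt l⟩
  · exact good_refl best

theorem bstep_good_right (best c : String) : good (bstep best c) c := by
  unfold bstep; split_ifs with h
  · exact good_refl c
  · push_neg at h
    by_cases hl : PySem.Str.len c < PySem.Str.len best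
    · exact Or.inl hl
    · have e : PySem.Str.len c = PySem.Str.len best := le_antisymm h.1 (not_lt.mp hl)
      exact Or.inr ⟨e, h.2 e⟩

theorem bstep_mem (best c : String) : bstep best c = best ∨ bstep best c = c := by
  unfold bstep; split_ifs <;> simp

-- B's inner loop: the result beats-or-equals every candidate and the seed, and is one of them.
theorem bfold_spec (l : List String) (t : String) :
    (l.foldl bstep t ∈ t :: l) ∧ good (l.foldl bstep t) t ∧ ∀ y ∈ l, good (l.foldl bstep t) y := by
  induction l generalizing t with
  | nil => exact ⟨List.mem_singleton.mpr rfl, good_refl t, by simp⟩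
  | cons c l ih =>
    obtain ⟨hmem, hseed, hall⟩ := ih (bstep t c)
    refine ⟨?_, ?_, ?_⟩
    · simp only [List.foldl_cons]
      rcases List.mem_cons.mp hmem with hm | hm
      · rw [hm]; rcases bstep_mem t c with h | h <;> rw [h] <;> simp
      · exact List.mem_cons.mpr (Or.inr (List.mem_cons.mpr (Or.inr hm)))
    · exact good_trans hseed (bstep_good_left t c)
    · intro y hy
      rcases List.mem_cons.mp hy with hy | hy
      · rw [hy]; exact good_trans hseed (bstep_good_right t c)
      · exact hall y hy

-- A's max?(key=len) step, as PySem.List.max? computes it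
def astep (acc : Option String) (x : String) : Option String :=
  match acc with
  | none => some x
  | some m => if PySem.Str.len m < PySem.Str.len x then some x else some m

theorem max?_cons_eq (h : String) (t : List String) :
    PySem.List.max? (h :: t) PySem.Str.len = t.foldl astep (some h) := by
  unfold PySem.List.max?
  rw [List.foldl_cons]
  apply PySem.List.foldl_congr_mem
  intro acc x _
  cases acc <;> rfl

-- A's max? loop on a lexicographically sorted list.
theorem afold_spec (t : List String) (a : String)
    (hsorted : ∀ y ∈ t, a ≤ y) (hp : t.Pairwise (· ≤ ·)) :
    ∃ m, t.foldl astep (some a) = some m ∧ good m a ∧ ∀ y ∈ t, good m y := by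
  induction t generalizing a with
  | nil => exact ⟨a, rfl, good_refl a, by simp⟩
  | cons c t ih =>
    have hac : a ≤ c := hsorted c (List.mem_cons_self ..)
    have hct : ∀ y ∈ t, c ≤ y := fun y hy => (List.pairwise_cons.mp hp).1 y hy
    have hpt : t.Pairwise (· ≤ ·) := (List.pairwise_cons.mp hp).2
    simp only [List.foldl_cons, astep]
    by_cases h : PySem.Str.len a < PySem.Str.len c
    · obtain ⟨m, heq, hg, hall⟩ := ih c hct hpt
      refine ⟨m, by rw [if_pos h]; exact heq, good_trans hg (Or.inl h), fun y hy => ?_⟩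
      rcases List.mem_cons.mp hy with rfl | hy
      · exact hg
      · exact hall y hy
    · have hat : ∀ y ∈ t, a ≤ y := fun y hy => le_trans hac (hct y hy)
      obtain ⟨m, heq, hg, hall⟩ := ih a hat hpt
      have hgc : good m c := by
        by_cases hl : PySem.Str.len c < PySem.Str.len a
        · exact good_trans hg (Or.inl hl)
        · exact good_trans hg (Or.inr ⟨le_antisymm (not_lt.mp h) (not_lt.mp hl), hac⟩)
      refine ⟨m, by rw [if_neg h]; exact heq, hg, fun y hy => ?_⟩
      rcases List.mem_cons.mp hy with rfl | hy
      · exact hgc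
      · exact hall y hy

-- per-topic agreement: max(sorted(lst+[topic]), key=len) = B's single pass
theorem per_topic (lst : List String) (topic : String) :
    PySem.List.max? (PySem.List.sorted (lst ++ [topic]) (fun x => x) false) PySem.Str.len
      = some (lst.foldl bstep topic) := by
  have hne : PySem.List.sorted (lst ++ [topic]) (fun x => x) false ≠ [] := by
    intro h
    have := (PySem.List.sorted_eq_nil_iff (xs := lst ++ [topic]) (key := fun x => x) (rev := false)).mp h
    simp at this
  obtain ⟨h, t, hst⟩ := List.exists_cons_of_ne_nil hne
  have hmem : ∀ y, y ∈ h :: t ↔ y ∈ lst ++ [topic] := fun y => by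
    rw [← hst]
    exact PySem.List.mem_sorted (xs := lst ++ [topic]) (key := fun x : String => x) (rev := false) y
  have hpair : (h :: t).Pairwise (· ≤ ·) := by
    rw [← hst]
    exact PySem.List.sorted_pairwise (xs := lst ++ [topic]) (key := fun x => x)
  obtain ⟨m, heq, hg, hall⟩ := afold_spec t h
    (fun y hy => (List.pairwise_cons.mp hpair).1 y hy) (List.pairwise_cons.mp hpair).2
  have hmax : PySem.List.max? (h :: t) PySem.Str.len = some m := by
    rw [max?_cons_eq]; exact heq
  obtain ⟨hbmem, hbseed, hball⟩ := bfold_spec lst topic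
  have hmA : ∀ y ∈ h :: t, good m y := fun y hy => by
    rcases List.mem_cons.mp hy with rfl | hy
    · exact hg
    · exact hall y hy
  have hmmem : m ∈ lst ++ [topic] := (hmem m).mp (PySem.List.max?_mem hmax)
  have hgbm : good (lst.foldl bstep topic) m := by
    rcases List.mem_append.mp hmmem with hm | hm
    · exact hball m hm
    · rw [List.mem_singleton.mp hm]; exact hbseed
  have hgmb : good m (lst.foldl bstep topic) := by
    apply hmA
    rw [hmem]
    rcases List.mem_cons.mp hbmem with hb | hb
    · rw [hb]; exact List.mem_append.mpr (Or.inr (List.mem_singleton.mpr rfl))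
    · exact List.mem_append.mpr (Or.inl hb)
  rw [hst, hmax, good_antisymm hgmb hgbm]

-- ===== VERDICT =====
theorem remove_same_as_spec : Claim_equal_remove_same_as := by
  unfold Claim_equal_remove_same_as
  intro topics cso _ _
  unfold Spec_remove_same_as remove_same_as remove_same_as_alt
  apply PySem.List.foldl_congr_mem
  intro acc topic _
  cases hget : PySem.Dict.get? (PySem.Dict.mk (PySem.Dict.getD (PySem.Dict.mk cso) "same_as" [])) topic with
  | none => rfl
  | some lst =>
    simp only [per_topic lst topic]
    rfl
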